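-- pv_equiv track=rewrite | github.com/SharthiAbhinay/1901CB46_2021 | tut02/tut02.py | get_memory_score
-- ===== SOURCE A (Python) =====
-- def get_memory_score( a):
--     check=[]
--     score=0
--     p=False
--     for i in a:
--         for j in check:
--             if(j==i):
--                p=True
--         if(p):
--             score=score+1
--             p=False
--         else:
--             check.append(i)
--     return score
-- ===== SOURCE B (Python) =====
-- def get_memory_score(a):
--     return len(a) - len(set(a))
-- ===== Notes on version B (the rewrite author's own statement) =====
-- stated objective: simpler
-- what changed: Replaces A's nested membership scan with the closed form len(a) - len(set(a)): non-first occurrences = total minus distinct count.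
import Mathlib
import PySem

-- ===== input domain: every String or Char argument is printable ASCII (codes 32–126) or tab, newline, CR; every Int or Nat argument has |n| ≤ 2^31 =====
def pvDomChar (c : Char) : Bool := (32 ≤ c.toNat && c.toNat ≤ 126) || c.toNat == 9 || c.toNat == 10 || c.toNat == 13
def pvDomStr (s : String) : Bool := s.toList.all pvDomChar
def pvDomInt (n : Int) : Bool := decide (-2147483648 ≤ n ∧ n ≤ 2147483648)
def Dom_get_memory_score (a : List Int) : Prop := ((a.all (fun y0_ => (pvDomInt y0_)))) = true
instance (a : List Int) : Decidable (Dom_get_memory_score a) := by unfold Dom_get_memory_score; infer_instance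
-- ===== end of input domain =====

-- B replaces A's nested membership scan with the closed form len(a) - len(set(a)) (simpler, asymptotically faster).


-- ===== PORT A =====
-- literal port of A: outer loop over a with state (check, score, p); inner loop scans check setting p
def get_memory_score (a : List Int) : Int :=
  let st := a.foldl (fun (st : List Int × Int × Bool) i =>
    let check := st.1
    let score := st.2.1
    let p := st.2.2
    let p := check.foldl (fun p j => if j == i then true else p) p
    if p then (check, score + 1, false) else (check ++ [i], score, p)) ([], 0, false)
  st.2.1

-- ===== PORT B =====
-- literal port of B: len(a) - len(set(a))
def get_memory_score_alt (a : List Int) : Int :=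
  (a.length : Int) - ((PySem.Set.ofList a).length : Int)

-- ===== PRECONDITION & SPEC =====
def Spec_get_memory_score (a : List Int) (out : Int) : Prop := out = get_memory_score_alt a
instance (a : List Int) (out : Int) : Decidable (Spec_get_memory_score a out) := by unfold Spec_get_memory_score; infer_instance

-- ===== CLAIM (what is proved, stated in full; the proofs are below) =====
def Claim_equal_get_memory_score : Prop := ∀ (a : List Int), Dom_get_memory_score a → Spec_get_memory_score a (get_memory_score a)

-- ===== LEMMAS AND PROOFS =====

-- A's inner scan over check computes p ∨ (i ∈ check)
theorem pv_inner_scan (check : List Int) (i : Int) (p : Bool) :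
    check.foldl (fun p j => if j == i then true else p) p = (p || check.contains i) := by
  induction check generalizing p with
  | nil => simp
  | cons c t ih =>
      simp only [List.foldl, List.contains_cons]
      rw [ih]
      by_cases h : c = i
      · simp [h]
      · rw [show (i == c) = false from beq_eq_false_iff_ne.mpr (fun e => h e.symm)]
        simp [h]

-- loop invariant: the score A accumulates equals (elements consumed) minus (distinct ones newly added)
theorem pv_loop_inv (a : List Int) (check : List Int) (score : Int) :
    (a.foldl (fun (st : List Int × Int × Bool) i =>
      let check := st.1
      let score := st.2.1
      let p := st.2.2
      let p := check.foldl (fun p j => if j == i then true else p) p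
      if p then (check, score + 1, false) else (check ++ [i], score, p)) (check, score, false)).2.1
    = score + (a.length : Int) - (((a.foldl PySem.Set.add check).length : Int) - (check.length : Int)) := by
  induction a generalizing check score with
  | nil => simp
  | cons i t ih =>
      simp only [List.foldl]
      rw [pv_inner_scan]
      simp only [Bool.false_or]
      by_cases h : check.contains i
      · rw [if_pos h]
        rw [ih]
        have hm : i ∈ check := by simpa using h
        have hadd : PySem.Set.add check i = check := by
          simp [PySem.Set.add, PySem.Set.contains, hm]
        rw [hadd]
        simp only [List.length_cons]
        push_cast
        ring
      · have hf : check.contains i = false := by simpa using h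
        rw [if_neg h]
        rw [hf, ih]
        have hm : ¬ i ∈ check := fun hmem => h (by simp [hmem])
        have hadd : PySem.Set.add check i = check ++ [i] := by
          simp [PySem.Set.add, PySem.Set.contains, hm]
        rw [hadd]
        simp only [List.length_cons, List.length_append, List.length_nil]
        push_cast
        ring

-- ===== VERDICT (by name: the statement is the Claim_ definition above) =====
theorem get_memory_score_spec : Claim_equal_get_memory_score := by
  intro a _
  show get_memory_score a = get_memory_score_alt a
  unfold get_memory_score get_memory_score_alt
  rw [pv_loop_inv]
  rw [PySem.Set.ofList_eq_foldl]
  simp
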